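-- pv_equiv track=rewrite | github.com/themarceloribeiro/takeoff-py | takeoff/generators/api/api_base_generator.py | installed_apps_last_line
-- ===== SOURCE A (Python) =====
-- def installed_apps_last_line(lines):
--     started = False
--     finish = 0
--
--     for index, line in enumerate(lines):
--         if 'INSTALLED_APPS' in line:
--             started = True
--         if started > 0 and finish == 0 and ']' in line:
--             finish = index
--
--     return finish
-- ===== SOURCE B (Python) =====
-- def installed_apps_last_line(lines):
--     lines = list(lines)
--     best = None   # smallest index >= current position whose line contains ']'
--     ans = None    # best recorded at the leftmost 'INSTALLED_APPS' line seen so far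
--     for index in range(len(lines) - 1, -1, -1):
--         line = lines[index]
--         if ']' in line:
--             best = index
--         if 'INSTALLED_APPS' in line:
--             ans = best
--     return ans if ans is not None else 0
-- ===== Notes on version B (the rewrite author's own statement) =====
-- stated objective: alternative
-- what changed: Replaced A's forward one-pass two-flag state machine with a single backward (right-to-left) pass that maintains the nearest ']' index to the right and records it at each INSTALLED_APPS line, so the leftmost INSTALLED_APPS line's record is the answer.
-- intended difference: When line 0 contains both 'INSTALLED_APPS' and ']' and some later line also contains ']', A's finish==0 sentinel overlooks the match at index 0 and returns the later ']' index, while B returns 0 (the first closing bracket), which is the intended closing line of the list. — e.g. on installed_apps_last_line(["INSTALLED_APPS = []", "]"]): A returns 1, B returns 0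
import Mathlib
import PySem

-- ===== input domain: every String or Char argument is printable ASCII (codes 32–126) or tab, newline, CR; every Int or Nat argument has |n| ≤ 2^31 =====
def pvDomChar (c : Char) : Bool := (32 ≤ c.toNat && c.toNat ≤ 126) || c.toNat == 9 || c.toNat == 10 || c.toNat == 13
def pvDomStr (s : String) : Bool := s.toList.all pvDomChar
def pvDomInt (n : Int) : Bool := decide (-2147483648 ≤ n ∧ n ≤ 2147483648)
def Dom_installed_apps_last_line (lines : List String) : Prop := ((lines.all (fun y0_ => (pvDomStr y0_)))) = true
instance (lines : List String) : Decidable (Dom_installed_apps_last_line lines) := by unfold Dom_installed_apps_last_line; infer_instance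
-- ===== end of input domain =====

-- B replaces A's forward two-flag state machine by a single backward pass tracking the nearest ']' to the right (objective: alternative).


-- ===== PORT A =====
-- 'INSTALLED_APPS' in line  /  ']' in line  (shared by both ports)
def pvHasIA (l : String) : Bool := PySem.Str.isIn "INSTALLED_APPS" l
def pvHasRB (l : String) : Bool := PySem.Str.isIn "]" l

def pvALoop (lines : List String) (i : Nat) (started : Bool) (finish : Int) : Int :=
  match lines with
  | [] => finish
  | l :: ls =>
    let started := started || pvHasIA l
    let finish := if started && finish == 0 && pvHasRB l then (i : Int) else finish
    pvALoop ls (i + 1) started finish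

def installed_apps_last_line (lines : List String) : Int :=
  pvALoop lines 0 false 0

-- ===== PORT B =====
-- backward pass: processing the suffix of `lines` starting at index i from right to left,
-- returns (best, ans) where best = smallest index ≥ i of a line containing ']',
-- ans = best recorded at the leftmost line containing 'INSTALLED_APPS' (none if absent).
def pvBScan (lines : List String) (i : Nat) : Option Nat × Option Nat :=
  match lines with
  | [] => (none, none)
  | l :: ls =>
    let s := pvBScan ls (i + 1)
    let best := if pvHasRB l then some i else s.1
    let ans := if pvHasIA l then best else s.2
    (best, ans)

def installed_apps_last_line_alt (lines : List String) : Int :=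
  match (pvBScan lines 0).2 with
  | none => 0
  | some j => (j : Int)

-- ===== PRECONDITION & SPEC =====
-- When line 0 contains both 'INSTALLED_APPS' and ']' and some later line also contains ']',
-- A's finish==0 sentinel overlooks the match at index 0 and returns the later ']' index,
-- while B returns 0 (the first closing bracket), which is the intended closing line of the list.
def D_installed_apps_last_line (lines : List String) : Prop :=
  lines ≠ [] ∧
  pvHasIA (lines.headD "") = true ∧
  pvHasRB (lines.headD "") = true ∧
  ∃ x ∈ lines.tail, pvHasRB x = true
instance (lines : List String) : Decidable (D_installed_apps_last_line lines) := by
  unfold D_installed_apps_last_line; infer_instance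

def Spec_installed_apps_last_line (lines : List String) (out : Int) : Prop :=
  ¬ D_installed_apps_last_line lines → out = installed_apps_last_line_alt lines
instance (lines : List String) (out : Int) : Decidable (Spec_installed_apps_last_line lines out) := by
  unfold Spec_installed_apps_last_line; infer_instance

def pvDiffWitness_installed_apps_last_line : List String := ["INSTALLED_APPS = []", "]"]
def pvDiffWitnessOut_installed_apps_last_line : Int × Int := (1, 0)

-- ===== CLAIM (what is proved, stated in full; the proofs are below) =====
def Claim_unchanged_installed_apps_last_line : Prop := ∀ (lines : List String), Dom_installed_apps_last_line lines → Spec_installed_apps_last_line lines (installed_apps_last_line lines)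
def Claim_changed_installed_apps_last_line : Prop := Dom_installed_apps_last_line (pvDiffWitness_installed_apps_last_line) ∧ D_installed_apps_last_line (pvDiffWitness_installed_apps_last_line) ∧ installed_apps_last_line (pvDiffWitness_installed_apps_last_line) = pvDiffWitnessOut_installed_apps_last_line.1 ∧ installed_apps_last_line_alt (pvDiffWitness_installed_apps_last_line) = pvDiffWitnessOut_installed_apps_last_line.2 ∧ pvDiffWitnessOut_installed_apps_last_line.1 ≠ pvDiffWitnessOut_installed_apps_last_line.2
def Claim_exact_installed_apps_last_line : Prop := ∀ (lines : List String), Dom_installed_apps_last_line lines → D_installed_apps_last_line lines → installed_apps_last_line lines ≠ installed_apps_last_line_alt lines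

-- ===== LEMMAS AND PROOFS =====

-- proof-only helpers: explicit first-index searches, used to characterise both loops
def pvFindIA (lines : List String) (i : Nat) : Option Nat :=
  match lines with
  | [] => none
  | l :: ls => if pvHasIA l then some i else pvFindIA ls (i + 1)

def pvFindRB (lines : List String) (i : Nat) : Option Nat :=
  match lines with
  | [] => none
  | l :: ls => if pvHasRB l then some i else pvFindRB ls (i + 1)

-- once finish ≠ 0, A's loop never changes it
lemma pvALoop_fixed (lines : List String) (i : Nat) (st : Bool) (f : Int) (h : f ≠ 0) :
    pvALoop lines i st f = f := by
  induction lines generalizing i st with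
  | nil => simp [pvALoop]
  | cons l ls ih =>
    simp only [pvALoop]
    have : (f == 0) = false := by simpa using h
    simp [this, ih]

lemma pvFindRB_ge (lines : List String) (i j : Nat) (h : pvFindRB lines i = some j) : i ≤ j := by
  induction lines generalizing i with
  | nil => simp [pvFindRB] at h
  | cons l ls ih =>
    simp only [pvFindRB] at h
    split at h
    · simp at h; omega
    · have := ih (i + 1) h; omega

lemma pvFindIA_ge (lines : List String) (i j : Nat) (h : pvFindIA lines i = some j) : i ≤ j := by
  induction lines generalizing i with
  | nil => simp [pvFindIA] at h
  | cons l ls ih =>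
    simp only [pvFindIA] at h
    split at h
    · simp at h; omega
    · have := ih (i + 1) h; omega

lemma pvFindRB_none_iff (lines : List String) (i : Nat) :
    pvFindRB lines i = none ↔ ∀ x ∈ lines, pvHasRB x = false := by
  induction lines generalizing i with
  | nil => simp [pvFindRB]
  | cons l ls ih =>
    simp only [pvFindRB]
    by_cases hl : pvHasRB l = true
    · simp [hl]
    · simp only [Bool.not_eq_true] at hl
      simp only [hl, Bool.false_eq_true, if_false]
      rw [ih (i + 1)]
      constructor
      · intro h x hx
        rcases List.mem_cons.1 hx with hx | hx
        · subst hx; exact hl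
        · exact h x hx
      · intro h x hx; exact h x (List.mem_cons_of_mem _ hx)

-- backward pass, first component: the first ']' index in the suffix
lemma pvBScan_fst (lines : List String) (i : Nat) :
    (pvBScan lines i).1 = pvFindRB lines i := by
  induction lines generalizing i with
  | nil => simp [pvBScan, pvFindRB]
  | cons l ls ih =>
    by_cases hl : pvHasRB l = true
    · simp [pvBScan, pvFindRB, hl]
    · simp only [Bool.not_eq_true] at hl
      simp [pvBScan, pvFindRB, hl, ih]

-- backward pass, second component: first ']' index at/after the first 'INSTALLED_APPS' index
lemma pvBScan_snd (lines : List String) (i : Nat) :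
    (pvBScan lines i).2 =
      match pvFindIA lines i with
      | none => none
      | some s => pvFindRB (lines.drop (s - i)) s := by
  induction lines generalizing i with
  | nil => simp [pvBScan, pvFindIA]
  | cons l ls ih =>
    by_cases hl : pvHasIA l = true
    · have hdrop : (l :: ls).drop (i - i) = l :: ls := by simp
      by_cases hr : pvHasRB l = true
      · simp [pvBScan, pvFindIA, hl, hr, hdrop, pvFindRB]
      · simp only [Bool.not_eq_true] at hr
        simp [pvBScan, pvFindIA, hl, hr, hdrop, pvFindRB, pvBScan_fst]
    · simp only [Bool.not_eq_true] at hl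
      simp only [pvBScan, pvFindIA, hl, Bool.false_eq_true, if_false]
      rw [ih (i + 1)]
      cases hfa : pvFindIA ls (i + 1) with
      | none => rfl
      | some s =>
        have hs : i + 1 ≤ s := pvFindIA_ge _ _ _ hfa
        have hd : (l :: ls).drop (s - i) = ls.drop (s - (i + 1)) := by
          have : s - i = (s - (i + 1)) + 1 := by omega
          simp [this]
        simp [hd]

-- B in locate-then-scan form, for comparison with A's loop
lemma alt_eq (lines : List String) :
    installed_apps_last_line_alt lines =
      match pvFindIA lines 0 with
      | none => 0
      | some s =>
        match pvFindRB (lines.drop s) s with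
        | none => 0
        | some j => (j : Int) := by
  unfold installed_apps_last_line_alt
  rw [pvBScan_snd]
  cases hfa : pvFindIA lines 0 with
  | none => rfl
  | some s => simp

-- A's loop after it has started (with finish = 0) is the first-']' search, provided indices are ≥ 1
lemma pvALoop_started (lines : List String) (i : Nat) (h : 1 ≤ i) :
    pvALoop lines i true 0 =
      match pvFindRB lines i with
      | none => 0
      | some j => (j : Int) := by
  induction lines generalizing i with
  | nil => simp [pvALoop, pvFindRB]
  | cons l ls ih =>
    simp only [pvALoop, pvFindRB]
    by_cases hl : pvHasRB l = true
    · have hi : (i : Int) ≠ 0 := by exact_mod_cast (by omega : i ≠ 0)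
      simp [hl, pvALoop_fixed _ _ _ _ hi]
    · simp only [Bool.not_eq_true] at hl
      simp [hl, ih (i + 1) (by omega)]

-- A's loop before it has started is the two-phase search, provided indices are ≥ 1
lemma pvALoop_unstarted (lines : List String) (i : Nat) (h : 1 ≤ i) :
    pvALoop lines i false 0 =
      match pvFindIA lines i with
      | none => 0
      | some s =>
        match pvFindRB (lines.drop (s - i)) s with
        | none => 0
        | some j => (j : Int) := by
  induction lines generalizing i with
  | nil => simp [pvALoop, pvFindIA]
  | cons l ls ih =>
    simp only [pvALoop, pvFindIA, Bool.false_or]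
    by_cases hl : pvHasIA l = true
    · simp only [hl, if_pos rfl]
      have hdrop : (l :: ls).drop (i - i) = l :: ls := by simp
      by_cases hr : pvHasRB l = true
      · have hi : (i : Int) ≠ 0 := by exact_mod_cast (by omega : i ≠ 0)
        simp [hr, pvALoop_fixed _ _ _ _ hi, hdrop, pvFindRB]
      · simp only [Bool.not_eq_true] at hr
        simp [hr, hdrop, pvFindRB, pvALoop_started ls (i + 1) (by omega)]
    · simp only [Bool.not_eq_true] at hl
      simp only [hl, Bool.false_eq_true, if_false, Bool.false_and]
      rw [ih (i + 1) (by omega)]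
      cases hfa : pvFindIA ls (i + 1) with
      | none => rfl
      | some s =>
        have hs : i + 1 ≤ s := pvFindIA_ge _ _ _ hfa
        have hd : (l :: ls).drop (s - i) = ls.drop (s - (i + 1)) := by
          have : s - i = (s - (i + 1)) + 1 := by omega
          simp [this]
        simp [hd]

-- ===== VERDICT (by name: the statement is the Claim_ definition above) =====
theorem installed_apps_last_line_spec : Claim_unchanged_installed_apps_last_line := by
  intro lines _ hnd
  rw [alt_eq]
  cases lines with
  | nil => rfl
  | cons l ls =>
    by_cases hl : pvHasIA l = true
    · by_cases hr : pvHasRB l = true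
      · -- head line has both; ¬D_ forces no ']' in the tail
        have htail : ∀ x ∈ ls, pvHasRB x = false := by
          by_contra hc
          push_neg at hc
          rcases hc with ⟨x, hx, hxr⟩
          exact hnd ⟨by simp, by simpa using hl, by simpa using hr,
            ⟨x, hx, by simpa using hxr⟩⟩
        have hnone : pvFindRB ls 1 = none := (pvFindRB_none_iff ls 1).2 htail
        simp [installed_apps_last_line, pvALoop, pvFindIA,
          pvFindRB, hl, hr, pvALoop_started ls 1 (by omega), hnone]
      · simp only [Bool.not_eq_true] at hr
        simp [installed_apps_last_line, pvALoop, pvFindIA,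
          pvFindRB, hl, hr, pvALoop_started ls 1 (by omega)]
    · simp only [Bool.not_eq_true] at hl
      simp only [installed_apps_last_line, pvALoop, pvFindIA, hl,
        Bool.false_or, Bool.false_eq_true, if_false, Bool.false_and]
      rw [pvALoop_unstarted ls 1 (by omega)]
      cases hfa : pvFindIA ls 1 with
      | none => rfl
      | some s =>
        have hs : 1 ≤ s := pvFindIA_ge _ _ _ hfa
        have hd : (l :: ls).drop s = ls.drop (s - 1) := by
          have : s = (s - 1) + 1 := by omega
          rw [this]; simp
        simp [hd]

theorem installed_apps_last_line_changed : Claim_changed_installed_apps_last_line := by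
  unfold Claim_changed_installed_apps_last_line; decide

theorem installed_apps_last_line_tight : Claim_exact_installed_apps_last_line := by
  intro lines _ hd
  rcases hd with ⟨hne, hia, hrb, x, hx, hxr⟩
  cases lines with
  | nil => exact absurd rfl hne
  | cons l ls =>
    simp only [List.headD_cons] at hia hrb
    simp only [List.tail_cons] at hx
    have hB : installed_apps_last_line_alt (l :: ls) = 0 := by
      rw [alt_eq]
      simp [pvFindIA, pvFindRB, hia, hrb]
    have hA : installed_apps_last_line (l :: ls) =
        match pvFindRB ls 1 with | none => 0 | some j => (j : Int) := by
      simp [installed_apps_last_line, pvALoop, hia, hrb, pvALoop_started ls 1 (by omega)]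
    cases hfr : pvFindRB ls 1 with
    | none =>
      exfalso
      exact absurd ((pvFindRB_none_iff ls 1).1 hfr x hx) (by simp [hxr])
    | some j =>
      have hj : 1 ≤ j := pvFindRB_ge _ _ _ hfr
      rw [hA, hB, hfr]
      have hz : (j : Int) ≠ 0 := by exact_mod_cast (by omega : j ≠ 0)
      simpa using hz
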